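-- pv_equiv track=rewrite | github.com/dhruvji/perturb-graph | build/build_biogrid_graphs.py | neighbors_by_hop
-- ===== SOURCE A (Python) =====
-- from collections import defaultdict, deque
-- from typing import Dict, List, Set
--
-- def neighbors_by_hop(graph: Dict[str, Set[str]], start: str, max_hops: int) -> Dict[int, Set[str]]:
--     """Breadth-first search to collect neighbors by hop distance."""
--     start = start.upper()
--     visited = {start}
--     queue = deque([(start, 0)])
--     hops: Dict[int, Set[str]] = {i: set() for i in range(1, max_hops + 1)}
--
--     while queue:
--         gene, depth = queue.popleft()
--         if depth >= max_hops:
--             continue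
--         for neighbor in graph.get(gene, set()):
--             if neighbor in visited:
--                 continue
--             visited.add(neighbor)
--             hop_idx = depth + 1
--             hops[hop_idx].add(neighbor)
--             queue.append((neighbor, hop_idx))
--     return hops
-- ===== SOURCE B (Python) =====
-- def neighbors_by_hop(graph, start, max_hops):
--     """Level-synchronous BFS: expand one whole frontier per hop."""
--     start = start.upper()
--     visited = {start}
--     frontier = [start]
--     hops = {h: set() for h in range(1, max_hops + 1)}
--     for h in range(1, max_hops + 1):
--         nxt = []
--         for gene in frontier:
--             for neighbor in graph.get(gene, set()):
--                 if neighbor not in visited: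
--                     visited.add(neighbor)
--                     nxt.append(neighbor)
--         hops[h] = set(nxt)
--         frontier = nxt
--     return hops
-- ===== Notes on version B (the rewrite author's own statement) =====
-- stated objective: alternative
-- what changed: Replaces the deque of (node, depth) pairs with depth checks per pop by a level-synchronous BFS that expands one whole frontier list per hop and assigns each hop's set at once.
import Mathlib
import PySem

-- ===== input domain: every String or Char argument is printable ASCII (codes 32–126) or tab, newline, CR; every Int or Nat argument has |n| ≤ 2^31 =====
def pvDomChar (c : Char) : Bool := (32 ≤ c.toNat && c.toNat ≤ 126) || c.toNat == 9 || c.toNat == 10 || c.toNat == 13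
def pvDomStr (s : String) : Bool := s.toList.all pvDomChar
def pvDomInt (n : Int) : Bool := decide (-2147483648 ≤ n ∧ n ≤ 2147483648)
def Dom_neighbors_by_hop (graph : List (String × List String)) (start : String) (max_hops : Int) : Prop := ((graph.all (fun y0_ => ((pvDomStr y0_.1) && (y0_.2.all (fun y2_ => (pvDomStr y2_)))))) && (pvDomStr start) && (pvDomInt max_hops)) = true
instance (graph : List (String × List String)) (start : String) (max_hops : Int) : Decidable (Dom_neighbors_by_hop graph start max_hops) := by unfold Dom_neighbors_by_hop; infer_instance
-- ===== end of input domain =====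

-- B replaces A's deque of (node, depth) pairs by a level-synchronous BFS expanding one whole
-- frontier per hop (objective: alternative decomposition, same asymptotic cost).
-- Inner hop sets are Python sets: equality proved here is on the ports' insertion-ordered lists.

-- ===== PORT A =====
-- all neighbor strings occurring in the graph (termination measure helper only)
def allNodes (graph : List (String × List String)) : List String := graph.flatMap Prod.snd

lemma mem_allNodes_of_get? (graph : List (String × List String)) (gene x : String)
    (hx : x ∈ ((PySem.Dict.mk graph).get? gene).getD []) : x ∈ allNodes graph := by
  induction graph with
  | nil => simp [PySem.Dict.get?] at hx
  | cons p rest ih =>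
    obtain ⟨k, vs⟩ := p
    rw [PySem.Dict.get?_mk_cons] at hx
    by_cases hk : (k == gene) = true
    · simp [hk] at hx
      simp [allNodes, List.flatMap]
      exact Or.inl hx
    · simp [hk] at hx
      have := ih hx
      simp [allNodes, List.flatMap] at this ⊢
      exact Or.inr this

-- body of A's inner 'for neighbor in graph.get(gene, set())' loop
-- (hops[hop_idx].add(neighbor) is ported as Dict.modify with default ∅; the key is always present when Python runs it)
def nbhA_step (depth : Int)
    (st : PySem.Set String × PySem.Dict Int (PySem.Set String) × List (String × Int))
    (neighbor : String) :
    PySem.Set String × PySem.Dict Int (PySem.Set String) × List (String × Int) :=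
  if PySem.Set.contains st.1 neighbor then st
  else (PySem.Set.add st.1 neighbor,
        PySem.Dict.modify st.2.1 (depth + 1) PySem.Set.empty (fun s => PySem.Set.add s neighbor),
        st.2.2 ++ [(neighbor, depth + 1)])

-- the inner loop never increases queue length + number of still-unvisited graph nodes (termination of A's while loop)
lemma nbhA_fold_measure (graph : List (String × List String)) (depth : Int) (nbrs : List String)
    (hsub : ∀ x ∈ nbrs, x ∈ allNodes graph) :
    ∀ (v : PySem.Set String) (H : PySem.Dict Int (PySem.Set String)) (q : List (String × Int)),
    (nbrs.foldl (nbhA_step depth) (v, H, q)).2.2.length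
      + ((allNodes graph).toFinset \ (nbrs.foldl (nbhA_step depth) (v, H, q)).1.toFinset).card
    ≤ q.length + ((allNodes graph).toFinset \ v.toFinset).card := by
  induction nbrs with
  | nil => intro v H q; simp
  | cons nb nbrs ih =>
    intro v H q
    have hnb : nb ∈ allNodes graph := hsub nb (by simp)
    have hsub' : ∀ x ∈ nbrs, x ∈ allNodes graph := fun x hx => hsub x (by simp [hx])
    rw [List.foldl_cons]
    by_cases hc : PySem.Set.contains v nb
    · simp only [nbhA_step, hc, if_true]
      exact (ih hsub' v H q).trans (by omega)
    · simp only [nbhA_step, hc, if_false, Bool.false_eq_true]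
      have hnm : nb ∉ v := by
        intro h; exact hc ((PySem.Set.contains_iff v nb).2 h)
      have hadd : PySem.Set.add v nb = v ++ [nb] := PySem.Set.add_of_not_mem hnm
      have h2 := ih hsub' (PySem.Set.add v nb)
        (PySem.Dict.modify H (depth + 1) PySem.Set.empty (fun s => PySem.Set.add s nb))
        (q ++ [(nb, depth + 1)])
      refine h2.trans ?_
      rw [hadd]
      have : ((allNodes graph).toFinset \ (v ++ [nb]).toFinset) = ((allNodes graph).toFinset \ v.toFinset).erase nb := by
        ext y
        simp [Finset.mem_sdiff, Finset.mem_erase, List.toFinset_append]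
        tauto
      rw [this]
      have hmem : nb ∈ (allNodes graph).toFinset \ v.toFinset := by
        simp [Finset.mem_sdiff, List.mem_toFinset]; exact ⟨hnb, hnm⟩
      have := Finset.card_erase_of_mem hmem
      have hpos : 0 < ((allNodes graph).toFinset \ v.toFinset).card := Finset.card_pos.2 ⟨nb, hmem⟩
      simp [List.length_append]
      omega

-- A's while loop over the deque of (gene, depth) pairs
def nbhA_loop (graph : List (String × List String)) (mh : Int) :
    List (String × Int) → PySem.Set String → PySem.Dict Int (PySem.Set String) →
      PySem.Dict Int (PySem.Set String)
  | [], _, hops => hops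
  | (gene, depth) :: rest, visited, hops =>
    if mh ≤ depth then nbhA_loop graph mh rest visited hops
    else
      let st := (((PySem.Dict.mk graph).get? gene).getD []).foldl (nbhA_step depth) (visited, hops, rest)
      nbhA_loop graph mh st.2.2 st.1 st.2.1
  termination_by q v _ => q.length + ((allNodes graph).toFinset \ v.toFinset).card
  decreasing_by
  · simp only [List.length_cons]; omega
  · have := nbhA_fold_measure graph depth (((PySem.Dict.mk graph).get? gene).getD [])
      (fun x hx => mem_allNodes_of_get? graph gene x hx) visited hops rest
    simp only [List.length_cons]
    omega

def neighbors_by_hop (graph : List (String × List String)) (start : String) (max_hops : Int) : List (Int × List String) :=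
  let start' := PySem.Str.upper start
  let visited : PySem.Set String := PySem.Set.ofList [start']
  let hops0 := (PySem.List.pyRange 1 (max_hops + 1)).foldl
    (fun d i => PySem.Dict.insert d i PySem.Set.empty) PySem.Dict.empty
  (nbhA_loop graph max_hops [(start', 0)] visited hops0).items

-- ===== PORT B =====
-- body of B's 'if neighbor not in visited: visited.add(neighbor); nxt.append(neighbor)'
def nbhB_inner (st : PySem.Set String × List String) (nb : String) : PySem.Set String × List String :=
  if PySem.Set.contains st.1 nb then st else (PySem.Set.add st.1 nb, st.2 ++ [nb])

-- body of B's 'for gene in frontier' loop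
def nbhB_geneStep (graph : List (String × List String))
    (st : PySem.Set String × List String) (gene : String) : PySem.Set String × List String :=
  (((PySem.Dict.mk graph).get? gene).getD []).foldl nbhB_inner st

-- body of B's 'for h in range(1, max_hops + 1)' loop; state = (frontier, visited, hops)
def nbhB_levelStep (graph : List (String × List String))
    (st : List String × PySem.Set String × PySem.Dict Int (PySem.Set String)) (h : Int) :
    List String × PySem.Set String × PySem.Dict Int (PySem.Set String) :=
  let p := st.1.foldl (nbhB_geneStep graph) (st.2.1, [])
  (p.2, p.1, PySem.Dict.insert st.2.2 h (PySem.Set.ofList p.2))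

def neighbors_by_hop_alt (graph : List (String × List String)) (start : String) (max_hops : Int) : List (Int × List String) :=
  let start' := PySem.Str.upper start
  let hops0 := (PySem.List.pyRange 1 (max_hops + 1)).foldl
    (fun d i => PySem.Dict.insert d i PySem.Set.empty) PySem.Dict.empty
  let fin := (PySem.List.pyRange 1 (max_hops + 1)).foldl (nbhB_levelStep graph)
    ([start'], PySem.Set.ofList [start'], hops0)
  fin.2.2.items

-- ===== PRECONDITION & SPEC =====
def Spec_neighbors_by_hop (graph : List (String × List String)) (start : String) (max_hops : Int) (out : List (Int × List String)) : Prop := out = neighbors_by_hop_alt graph start max_hops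
instance (graph : List (String × List String)) (start : String) (max_hops : Int) (out : List (Int × List String)) : Decidable (Spec_neighbors_by_hop graph start max_hops out) := by unfold Spec_neighbors_by_hop; infer_instance

-- ===== CLAIM (what is proved, stated in full; the proofs are below) =====
def Claim_equal_neighbors_by_hop : Prop := ∀ (graph : List (String × List String)) (start : String) (max_hops : Int), Dom_neighbors_by_hop graph start max_hops → Spec_neighbors_by_hop graph start max_hops (neighbors_by_hop graph start max_hops)

-- ===== LEMMAS AND PROOFS =====

-- overwriting a key with the value it already holds does not change the dict
lemma insert_self_of_get? (H : PySem.Dict Int (PySem.Set String)) (k : Int) (v : PySem.Set String)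
    (hn : H.keys.Nodup) (h : H.get? k = some v) : PySem.Dict.insert H k v = H := by
  apply PySem.Dict.ext
  have hc : H.contains k = true := by
    rw [PySem.Dict.contains_eq_isSome_get?, h]; rfl
  rw [PySem.Dict.items_insert_of_contains H v hc]
  conv_rhs => rw [← List.map_id H.items]
  apply List.map_congr_left
  intro p hp
  by_cases hk : (p.1 == k) = true
  · have hk' : p.1 = k := by simpa using hk
    have : H.get? p.1 = some p.2 := PySem.Dict.get?_of_mem_items H (by simpa using hp) hn
    rw [hk'] at this
    rw [h] at this
    simp only [Option.some.injEq] at this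
    simp only [hk, if_true, id]
    rw [this, ← hk']
  · simp [hk]

-- B's per-neighbor fold: new nodes lie in the new visited set, stay distinct, and visited only grows
lemma inner_inv (nbrs : List String) :
    ∀ (v : PySem.Set String) (ns : List String), (∀ x ∈ ns, x ∈ v) → ns.Nodup →
    (∀ x ∈ (nbrs.foldl nbhB_inner (v, ns)).2, x ∈ (nbrs.foldl nbhB_inner (v, ns)).1)
      ∧ (nbrs.foldl nbhB_inner (v, ns)).2.Nodup
      ∧ (∀ x ∈ v, x ∈ (nbrs.foldl nbhB_inner (v, ns)).1) := by
  induction nbrs with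
  | nil => intro v ns h1 h2; exact ⟨h1, h2, fun x hx => hx⟩
  | cons nb nbrs ih =>
    intro v ns h1 h2
    rw [List.foldl_cons]
    by_cases hc : PySem.Set.contains v nb
    · simp only [nbhB_inner, hc, if_true]
      exact ih v ns h1 h2
    · simp only [nbhB_inner, hc, if_false, Bool.false_eq_true]
      have hnm : nb ∉ v := fun h => hc ((PySem.Set.contains_iff v nb).2 h)
      have h1' : ∀ x ∈ ns ++ [nb], x ∈ PySem.Set.add v nb := by
        intro x hx
        rcases List.mem_append.1 hx with hx | hx
        · exact (PySem.Set.mem_add _ _ _).2 (Or.inl (h1 x hx))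
        · simp at hx; exact (PySem.Set.mem_add _ _ _).2 (Or.inr hx)
      have h2' : (ns ++ [nb]).Nodup := by
        refine h2.append (List.nodup_singleton _) ?_
        intro x hx hx'
        simp at hx'
        subst hx'
        exact hnm (h1 x hx)
      obtain ⟨a, b, c⟩ := ih (PySem.Set.add v nb) (ns ++ [nb]) h1' h2'
      exact ⟨a, b, fun x hx => c x ((PySem.Set.mem_add _ _ _).2 (Or.inl hx))⟩

-- same invariants for B's whole-frontier fold
lemma level_inv (graph : List (String × List String)) (front : List String) :
    ∀ (v : PySem.Set String) (ns : List String), (∀ x ∈ ns, x ∈ v) → ns.Nodup →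
    (∀ x ∈ (front.foldl (nbhB_geneStep graph) (v, ns)).2, x ∈ (front.foldl (nbhB_geneStep graph) (v, ns)).1)
      ∧ (front.foldl (nbhB_geneStep graph) (v, ns)).2.Nodup := by
  induction front with
  | nil => intro v ns h1 h2; exact ⟨h1, h2⟩
  | cons g front ih =>
    intro v ns h1 h2
    rw [List.foldl_cons]
    obtain ⟨a, b, _⟩ := inner_inv (((PySem.Dict.mk graph).get? g).getD []) v ns h1 h2
    have : nbhB_geneStep graph (v, ns) g = (((PySem.Dict.mk graph).get? g).getD []).foldl nbhB_inner (v, ns) := rfl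
    rw [this]
    exact ih _ _ a b

-- one gene's neighbor loop: A's (visited, hops, queue) fold ≡ B's (visited, nxt) fold
lemma inner_corr (d : Int) (nbrs : List String) :
    ∀ (v : PySem.Set String) (H : PySem.Dict Int (PySem.Set String)) (ns : List String)
      (q0 : List (String × Int)),
    H.keys.Nodup → H.get? (d + 1) = some ns → (∀ x ∈ ns, x ∈ v) →
    nbrs.foldl (nbhA_step d) (v, H, q0 ++ ns.map (fun g => (g, d + 1)))
      = ((nbrs.foldl nbhB_inner (v, ns)).1,
         PySem.Dict.insert H (d + 1) (nbrs.foldl nbhB_inner (v, ns)).2,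
         q0 ++ ((nbrs.foldl nbhB_inner (v, ns)).2).map (fun g => (g, d + 1))) := by
  induction nbrs with
  | nil =>
    intro v H ns q0 hn hg hm
    simp only [List.foldl_nil]
    rw [insert_self_of_get? H (d + 1) ns hn hg]
  | cons nb nbrs ih =>
    intro v H ns q0 hn hg hm
    rw [List.foldl_cons, List.foldl_cons]
    by_cases hc : PySem.Set.contains v nb
    · simp only [nbhA_step, nbhB_inner, hc, if_true]
      exact ih v H ns q0 hn hg hm
    · simp only [nbhA_step, nbhB_inner, hc, if_false, Bool.false_eq_true]
      have hnm : nb ∉ v := fun h => hc ((PySem.Set.contains_iff v nb).2 h)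
      have hnmns : nb ∉ ns := fun h => hnm (hm nb h)
      have hmod : PySem.Dict.modify H (d + 1) PySem.Set.empty (fun s => PySem.Set.add s nb)
          = PySem.Dict.insert H (d + 1) (ns ++ [nb]) := by
        show PySem.Dict.insert H (d + 1) (PySem.Set.add (H.getD (d + 1) PySem.Set.empty) nb) = _
        rw [PySem.Dict.getD_eq_get?_getD, hg]
        show PySem.Dict.insert H (d + 1) (PySem.Set.add ns nb) = _
        rw [PySem.Set.add_of_not_mem hnmns]
      have hq : (q0 ++ ns.map (fun g => (g, d + 1))) ++ [(nb, d + 1)]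
          = q0 ++ (ns ++ [nb]).map (fun g => (g, d + 1)) := by
        simp [List.map_append]
      have hm' : ∀ x ∈ ns ++ [nb], x ∈ PySem.Set.add v nb := by
        intro x hx
        rcases List.mem_append.1 hx with hx | hx
        · exact (PySem.Set.mem_add _ _ _).2 (Or.inl (hm x hx))
        · simp at hx; exact (PySem.Set.mem_add _ _ _).2 (Or.inr hx)
      rw [hmod, hq]
      have := ih (PySem.Set.add v nb) (PySem.Dict.insert H (d + 1) (ns ++ [nb])) (ns ++ [nb]) q0
        (PySem.Dict.nodup_keys_insert H (d + 1) (ns ++ [nb]) hn)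
        (PySem.Dict.get?_insert_self H (d + 1) (ns ++ [nb]))
        hm'
      rw [this, PySem.Dict.insert_insert_self]

-- queue entries at depth ≥ max_hops are all skipped
lemma A_done (graph : List (String × List String)) (mh : Int) :
    ∀ (q : List (String × Int)) (v : PySem.Set String) (H : PySem.Dict Int (PySem.Set String)),
    (∀ p ∈ q, mh ≤ p.2) → nbhA_loop graph mh q v H = H := by
  intro q
  induction q with
  | nil => intro v H _; rw [nbhA_loop]
  | cons p rest ih =>
    intro v H hq
    obtain ⟨g, dep⟩ := p
    have : mh ≤ dep := hq (g, dep) (by simp)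
    rw [nbhA_loop]
    simp only [this, if_true]
    exact ih v H (fun p hp => hq p (by simp [hp]))

-- one whole level of A's queue processing ≡ B's frontier fold
lemma level_corr (graph : List (String × List String)) (mh d : Int) (hd : d < mh)
    (front : List String) :
    ∀ (v : PySem.Set String) (H : PySem.Dict Int (PySem.Set String))
      (ns : List String),
    H.keys.Nodup → H.get? (d + 1) = some ns → (∀ x ∈ ns, x ∈ v) → ns.Nodup →
    nbhA_loop graph mh (front.map (fun g => (g, d)) ++ ns.map (fun g => (g, d + 1))) v H
      = nbhA_loop graph mh
          (((front.foldl (nbhB_geneStep graph) (v, ns)).2).map (fun g => (g, d + 1)))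
          (front.foldl (nbhB_geneStep graph) (v, ns)).1
          (PySem.Dict.insert H (d + 1) (front.foldl (nbhB_geneStep graph) (v, ns)).2) := by
  induction front with
  | nil =>
    intro v H ns hn hg hm hnd
    simp only [List.map_nil, List.nil_append, List.foldl_nil]
    rw [insert_self_of_get? H (d + 1) ns hn hg]
  | cons gene front ih =>
    intro v H ns hn hg hm hnd
    rw [List.map_cons, List.cons_append, nbhA_loop]
    have hlt : ¬ (mh ≤ d) := by omega
    simp only [hlt, if_false]
    rw [inner_corr d (((PySem.Dict.mk graph).get? gene).getD []) v H ns (front.map (fun g => (g, d))) hn hg hm]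
    have hb : (((PySem.Dict.mk graph).get? gene).getD []).foldl nbhB_inner (v, ns)
        = nbhB_geneStep graph (v, ns) gene := rfl
    obtain ⟨a, b, _⟩ := inner_inv (((PySem.Dict.mk graph).get? gene).getD []) v ns hm hnd
    rw [hb] at a b
    have := ih (nbhB_geneStep graph (v, ns) gene).1
      (PySem.Dict.insert H (d + 1) (nbhB_geneStep graph (v, ns) gene).2)
      (nbhB_geneStep graph (v, ns) gene).2
      (PySem.Dict.nodup_keys_insert _ _ _ hn)
      (PySem.Dict.get?_insert_self _ _ _)
      a b
    simp only [hb]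
    rw [this, PySem.Dict.insert_insert_self, List.foldl_cons]

-- lookups in the pre-seeded {i: set() for i in range(…)} dict
lemma get?_fold_insert_empty (l : List Int) :
    ∀ (d0 : PySem.Dict Int (PySem.Set String)) (j : Int),
    (l.foldl (fun d i => PySem.Dict.insert d i PySem.Set.empty) d0).get? j
      = if j ∈ l then some [] else d0.get? j := by
  induction l with
  | nil => intro d0 j; simp
  | cons i l ih =>
    intro d0 j
    rw [List.foldl_cons, ih]
    by_cases hl : j ∈ l
    · simp [hl]
    · rw [PySem.Dict.get?_insert]
      by_cases hj : j = i
      · simp [hj, PySem.Set.empty]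
      · simp [hl, hj]

-- main correspondence: the rest of A's run from a clean level boundary ≡ B's remaining hop loop
lemma main_corr (graph : List (String × List String)) (mh : Int) :
    ∀ (k : Nat) (d : Int) (front : List String) (v : PySem.Set String)
      (H : PySem.Dict Int (PySem.Set String)),
    d + k = mh → H.keys.Nodup → (∀ i : Int, d < i → i ≤ mh → H.get? i = some []) →
    nbhA_loop graph mh (front.map (fun g => (g, d))) v H
      = ((PySem.List.pyRange (d + 1) (mh + 1)).foldl (nbhB_levelStep graph) (front, v, H)).2.2 := by
  intro k
  induction k with
  | zero =>
    intro d front v H hk hn hinv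
    have hd : d = mh := by omega
    rw [PySem.List.pyRange_one_eq_nil (by omega)]
    rw [A_done graph mh _ v H (by intro p hp; simp only [List.mem_map] at hp; obtain ⟨g, hg, rfl⟩ := hp; simp; omega)]
    simp
  | succ k ih =>
    intro d front v H hk hn hinv
    have hd : d < mh := by omega
    rw [PySem.List.pyRange_one_cons (by omega : d + 1 < mh + 1), List.foldl_cons]
    have hstep : nbhB_levelStep graph (front, v, H) (d + 1)
        = ((front.foldl (nbhB_geneStep graph) (v, [])).2,
           (front.foldl (nbhB_geneStep graph) (v, [])).1,
           PySem.Dict.insert H (d + 1) (PySem.Set.ofList (front.foldl (nbhB_geneStep graph) (v, [])).2)) := rfl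
    obtain ⟨hsub, hnodup⟩ := level_inv graph front v [] (by simp) (by simp)
    have hof : PySem.Set.ofList (front.foldl (nbhB_geneStep graph) (v, [])).2
        = (front.foldl (nbhB_geneStep graph) (v, [])).2 :=
      PySem.Set.ofList_eq_self_of_nodup _ hnodup
    have hA : front.map (fun g => (g, d)) = front.map (fun g => (g, d)) ++ ([] : List String).map (fun g => (g, d + 1)) := by simp
    rw [hA, level_corr graph mh d hd front v H [] hn (hinv (d + 1) (by omega) (by omega)) (by simp) (by simp)]
    rw [hstep, hof]
    have := ih (d + 1) (front.foldl (nbhB_geneStep graph) (v, [])).2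
      (front.foldl (nbhB_geneStep graph) (v, [])).1
      (PySem.Dict.insert H (d + 1) (front.foldl (nbhB_geneStep graph) (v, [])).2)
      (by omega)
      (PySem.Dict.nodup_keys_insert _ _ _ hn)
      (by
        intro i hi1 hi2
        rw [PySem.Dict.get?_insert_of_ne _ _ (by omega : i ≠ d + 1)]
        exact hinv i (by omega) hi2)
    rw [this]

-- ===== VERDICT (by name: the statement is the Claim_ definition above) =====
theorem neighbors_by_hop_spec : Claim_equal_neighbors_by_hop := by
  intro graph start max_hops _
  unfold Spec_neighbors_by_hop neighbors_by_hop neighbors_by_hop_alt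
  simp only []
  by_cases hmh : max_hops ≤ 0
  · rw [PySem.List.pyRange_one_eq_nil (by omega : max_hops + 1 ≤ 1)]
    rw [A_done graph max_hops _ _ _ (by intro p hp; simp only [List.mem_singleton] at hp; subst hp; simp; omega)]
    simp
  · have h0 : [(PySem.Str.upper start, (0 : Int))]
        = [PySem.Str.upper start].map (fun g => (g, (0 : Int))) := by simp
    rw [h0]
    rw [main_corr graph max_hops max_hops.toNat 0 [PySem.Str.upper start]
      (PySem.Set.ofList [PySem.Str.upper start]) _
      (by omega)
      (by
        exact PySem.Dict.nodup_keys_foldl_insert _ (fun _ _ => PySem.Set.empty) _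
          (PySem.Dict.nodup_keys_empty))
      (by
        intro i hi1 hi2
        rw [get?_fold_insert_empty]
        simp [PySem.List.mem_pyRange_one]
        omega)]
    norm_num
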